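-- pv_equiv track=rewrite | github.com/camilla-tree/Financeiro | parsers/bb.py | _remove_spans
-- ===== SOURCE A (Python) =====
-- def _remove_spans(text: str, spans: list[tuple[int, int]]) -> str:
--     """Remove vários trechos do texto (spans) e mantém o restante."""
--     if not spans:
--         return text
--     spans = sorted(spans, key=lambda x: x[0])
--     out = []
--     last = 0
--     for a, b in spans:
--         if a > last:
--             out.append(text[last:a])
--         last = max(last, b)
--     if last < len(text):
--         out.append(text[last:])
--     return "".join(out)
-- ===== SOURCE B (Python) =====
-- def _remove_spans(text: str, spans: list[tuple[int, int]]) -> str: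
--     """Remove vários trechos do texto (spans) e mantém o restante."""
--     out = []
--     last = 0
--     ss = list(spans)
--     while ss:
--         m = min(ss, key=lambda s: s[0])  # first span with the smallest start
--         ss.remove(m)
--         a, b = m
--         if a > last:
--             out.append(text[last:a])
--         last = max(last, b)
--     out.append(text[last:])
--     return "".join(out)
-- ===== Notes on version B (the rewrite author's own statement) =====
-- stated objective: alternative
-- what changed: Replaces A's sort-then-sweep (sorted copy of spans, guarded appends, conditional tail) by selection-based extraction: a while loop that repeatedly takes min(ss, key=start) out of a shrinking worklist and emits the gap, with an unconditional tail slice and no empty-spans guard.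
import Mathlib
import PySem

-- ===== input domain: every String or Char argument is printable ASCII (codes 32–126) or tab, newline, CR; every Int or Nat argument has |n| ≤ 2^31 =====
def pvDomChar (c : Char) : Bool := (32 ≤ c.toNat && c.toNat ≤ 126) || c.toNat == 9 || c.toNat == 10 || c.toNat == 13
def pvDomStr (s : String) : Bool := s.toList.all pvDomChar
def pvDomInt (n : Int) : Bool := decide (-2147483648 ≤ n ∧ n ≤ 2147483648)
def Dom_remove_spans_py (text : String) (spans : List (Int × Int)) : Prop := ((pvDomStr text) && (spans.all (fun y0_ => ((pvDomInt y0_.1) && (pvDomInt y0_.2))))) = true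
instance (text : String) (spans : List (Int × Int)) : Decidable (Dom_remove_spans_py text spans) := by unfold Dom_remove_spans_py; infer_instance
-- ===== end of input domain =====

-- B replaces A's sort-then-sweep by selection-based extraction: a loop that
-- repeatedly removes the first minimal-start span from a shrinking worklist and
-- emits the gap before it, with an unconditional tail and no empty-spans guard
-- (alternative decomposition, same return value on every input; no speed claim).

-- ===== PORT A =====
def remove_spans_py (text : String) (spans : List (Int × Int)) : String :=
  if spans = [] then text
  else
    let ss := PySem.List.sorted spans (fun x => x.1)
    let st := ss.foldl (fun (st : List String × Int) p =>
      (if p.1 > st.2 then st.1 ++ [PySem.Str.slice text (some st.2) (some p.1)] else st.1,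
       max st.2 p.2)) (([] : List String), (0 : Int))
    PySem.Str.join ""
      (if st.2 < PySem.Str.len text then st.1 ++ [PySem.Str.slice text (some st.2) none] else st.1)

-- ===== PORT B =====
-- Source B's `while ss:` loop as the obvious structural recursion on the worklist:
-- m = min(ss, key=lambda s: s[0]) is PySem.List.min? (FIRST minimal element,
-- like Python's min), ss.remove(m) is PySem.List.remove? (m ∈ ss, so Python's
-- remove never raises; the `none` branch is unreachable and just stops).
def pvAltLoop (text : String) (ss : List (Int × Int)) (out : List String) (last : Int) :
    List String × Int :=
  match hm : PySem.List.min? ss (fun s => s.1) with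
  | none => (out, last)
  | some m =>
    match hr : PySem.List.remove? ss m with
    | none => (out, last)
    | some rest =>
      pvAltLoop text rest
        (if m.1 > last then out ++ [PySem.Str.slice text (some last) (some m.1)] else out)
        (max last m.2)
termination_by ss.length
decreasing_by
  have hmem : m ∈ ss := PySem.List.min?_mem hm
  rw [PySem.List.remove?_eq_some_erase ss m hmem] at hr
  cases hr
  have := List.length_erase_of_mem hmem
  have := List.length_pos_of_mem hmem
  omega

def remove_spans_py_alt (text : String) (spans : List (Int × Int)) : String :=
  let st := pvAltLoop text spans [] 0
  PySem.Str.join "" (st.1 ++ [PySem.Str.slice text (some st.2) none])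

-- ===== PRECONDITION & SPEC =====
def Spec_remove_spans_py (text : String) (spans : List (Int × Int)) (out : String) : Prop := out = remove_spans_py_alt text spans
instance (text : String) (spans : List (Int × Int)) (out : String) : Decidable (Spec_remove_spans_py text spans out) := by unfold Spec_remove_spans_py; infer_instance

-- ===== CLAIM (what is proved, stated in full; the proofs are below) =====
def Claim_equal_remove_spans_py : Prop := ∀ (text : String) (spans : List (Int × Int)), Dom_remove_spans_py text spans → Spec_remove_spans_py text spans (remove_spans_py text spans)

-- ===== LEMMAS AND PROOFS =====

-- the kept slices, span by span in processing order, starting from cursor `last`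
def pvPieces (text : String) : List (Int × Int) → Int → List String
  | [], _ => []
  | p :: r, last =>
      (if p.1 > last then [PySem.Str.slice text (some last) (some p.1)] else [])
        ++ pvPieces text r (max last p.2)

-- the final cursor (running max of the span ends and the seed)
def pvLast : List (Int × Int) → Int → Int
  | [], last => last
  | p :: r, last => pvLast r (max last p.2)

theorem pvLast_nonneg (ss : List (Int × Int)) (last : Int) (h : 0 ≤ last) :
    0 ≤ pvLast ss last := by
  induction ss generalizing last with
  | nil => exact h
  | cons p r ih => exact ih _ (le_trans h (le_max_left _ _))

-- A's fold over the sorted list is (pieces, final cursor)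
theorem pvFoldA (text : String) (ss : List (Int × Int)) (acc : List String) (last : Int) :
    ss.foldl (fun (st : List String × Int) p =>
      (if p.1 > st.2 then st.1 ++ [PySem.Str.slice text (some st.2) (some p.1)] else st.1,
       max st.2 p.2)) (acc, last)
      = (acc ++ pvPieces text ss last, pvLast ss last) := by
  induction ss generalizing acc last with
  | nil => simp [pvPieces, pvLast]
  | cons p r ih =>
      simp only [List.foldl_cons, ih, pvPieces, pvLast]
      by_cases h : p.1 > last <;> simp [h]

theorem sortedSnoc (ss : List (Int×Int)) (y : Int×Int) :
  PySem.List.sorted (ss ++ [y]) (fun s => s.1)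
    = PySem.List.insertBy (fun a b => decide (a.1 < b.1)) y (PySem.List.sorted ss (fun s => s.1)) := by
  rw [PySem.List.sorted_eq_foldl_insertBy, PySem.List.sorted_eq_foldl_insertBy, List.foldl_append]
  rfl

theorem minSnoc (ss : List (Int×Int)) (y : Int×Int) :
  PySem.List.min? (ss ++ [y]) (fun s => s.1)
    = some (match PySem.List.min? ss (fun s => s.1) with
            | none => y
            | some m => if y.1 < m.1 then y else m) := by
  simp only [PySem.List.min?, List.foldl_append, List.foldl_cons, List.foldl_nil]
  cases List.foldl _ (none : Option (Int×Int)) ss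
  · simp
  · simp only []
    split <;> simp_all

theorem pvSortedHeadErase (ss : List (Int × Int)) (m : Int × Int) (tl : List (Int × Int))
    (hsort : PySem.List.sorted ss (fun s => s.1) = m :: tl) :
    PySem.List.min? ss (fun s => s.1) = some m ∧
      tl = PySem.List.sorted (ss.erase m) (fun s => s.1) := by
  induction ss using List.reverseRecOn generalizing m tl with
  | nil => simp [PySem.List.sorted] at hsort
  | append_singleton ss y ih =>
      rw [sortedSnoc] at hsort
      rcases hs : PySem.List.sorted ss (fun s => s.1) with _ | ⟨m', t'⟩
      · have hss : ss = [] := (PySem.List.sorted_eq_nil_iff ss _ _).mp hs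
        subst hss
        simp only [PySem.List.sorted, List.foldl_nil, PySem.List.insertBy] at hsort
        obtain ⟨h1, h2⟩ := List.cons.inj hsort
        subst h1
        refine ⟨rfl, ?_⟩
        simp [← h2, PySem.List.sorted]
      · obtain ⟨hmin', htl'⟩ := ih m' t' hs
        rw [hs] at hsort
        rw [minSnoc, hmin']
        by_cases hy : y.1 < m'.1
        · rw [PySem.List.insertBy] at hsort
          simp only [hy, decide_true, if_true] at hsort
          obtain ⟨h1, h2⟩ := List.cons.inj hsort
          subst h1
          have hynot : y ∉ ss := by
            intro hmem
            have := PySem.List.key_head_sorted_le ss (fun s => s.1) hs y hmem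
            simp at this; omega
          refine ⟨by simp [hy], ?_⟩
          rw [List.erase_append_right _ hynot]
          rw [show ([y].erase y) = [] by simp]
          rw [List.append_nil, hs, ← h2]
        · rw [PySem.List.insertBy] at hsort
          simp only [hy, decide_false, Bool.false_eq_true, if_false] at hsort
          obtain ⟨h1, h2⟩ := List.cons.inj hsort
          subst h1
          have hmem : m' ∈ ss :=
            (PySem.List.mem_sorted ss (fun s => s.1) false m').mp (by rw [hs]; simp)
          refine ⟨by simp [hy], ?_⟩
          rw [List.erase_append_left _ hmem, sortedSnoc, ← htl', ← h2]

theorem pvAltLoop_spec (text : String) (ss : List (Int × Int)) (out : List String) (last : Int) :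
    pvAltLoop text ss out last
      = (out ++ pvPieces text (PySem.List.sorted ss (fun s => s.1)) last,
         pvLast (PySem.List.sorted ss (fun s => s.1)) last) := by
  rw [pvAltLoop]
  cases hm : PySem.List.min? ss (fun s => s.1) with
  | none =>
      have hss : ss = [] := by
        cases ss with
        | nil => rfl
        | cons x t => exact absurd hm (by simp [PySem.List.min?_eq_none_iff])
      subst hss
      simp [PySem.List.sorted, pvPieces, pvLast]
  | some m =>
      have hmem : m ∈ ss := PySem.List.min?_mem hm
      obtain ⟨m', tl, hsort⟩ :
          ∃ m' tl, PySem.List.sorted ss (fun s => s.1) = m' :: tl := by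
        cases h : PySem.List.sorted ss (fun s => s.1) with
        | nil =>
            have : ss = [] := (PySem.List.sorted_eq_nil_iff ss _ _).mp h
            subst this; simp at hmem
        | cons a b => exact ⟨a, b, rfl⟩
      obtain ⟨hmin, htl⟩ := pvSortedHeadErase ss m' tl hsort
      rw [hm] at hmin
      obtain rfl : m = m' := by injection hmin
      dsimp only
      rw [PySem.List.remove?_eq_some_erase ss m hmem]
      dsimp only
      rw [pvAltLoop_spec text (ss.erase m) _ _]
      rw [hsort, htl]
      by_cases h : last < m.1 <;> simp [pvPieces, pvLast, h]
termination_by ss.length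
decreasing_by
  have := List.length_erase_of_mem hmem
  have := List.length_pos_of_mem hmem
  omega


theorem pvJoinNil (ls : List (List Char)) : PySem.Chars.join [] ls = ls.flatten := by
  induction ls with
  | nil => simp [PySem.Chars.join_nil]
  | cons a r ih =>
      cases r with
      | nil => simp [PySem.Chars.join_singleton]
      | cons b t => simp only [PySem.Chars.join_cons_cons, ih, List.flatten_cons]; simp

theorem remove_spans_py_spec_aux (text : String) (spans : List (Int × Int)) :
    remove_spans_py text spans = remove_spans_py_alt text spans := by
  unfold remove_spans_py remove_spans_py_alt
  rw [pvAltLoop_spec]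
  by_cases h : spans = []
  · subst h
    apply String.toList_inj.mp
    simp [PySem.List.sorted, pvPieces, pvLast, PySem.Str.join, PySem.Str.slice,
      PySem.List.slice_from]
  · simp only [h, ite_false]
    rw [pvFoldA]
    dsimp only
    simp only [List.nil_append]
    have hL : 0 ≤ pvLast (PySem.List.sorted spans (fun x => x.1)) 0 :=
      pvLast_nonneg _ _ le_rfl
    by_cases hlt : pvLast (PySem.List.sorted spans (fun x => x.1)) 0 < PySem.Str.len text
    · rw [if_pos hlt]
    · rw [if_neg hlt]
      apply String.toList_inj.mp
      have hdrop : (PySem.List.slice text.toList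
          (some (pvLast (PySem.List.sorted spans (fun x => x.1)) 0)) none) = [] := by
        rw [PySem.List.slice_from]
        apply List.drop_eq_nil_of_le
        · simp only [PySem.Str.len] at hlt
          omega
        · exact hL
      simp [PySem.Str.join, PySem.Str.slice, pvJoinNil, hdrop]

-- ===== VERDICT (by name: the statement is the Claim_ definition above) =====
theorem remove_spans_py_spec : Claim_equal_remove_spans_py := by
  intro text spans _
  exact remove_spans_py_spec_aux text spans
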